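-- pv_equiv track=rewrite | github.com/tachyon-beep/eidolon | src/eidolon/rulepack/compiler.py | _glob_to_like
-- ===== SOURCE A (Python) =====
-- def _glob_to_like(pattern: str) -> str:
--     """Convert a shell-style glob to a SQL LIKE pattern."""
--     buffer: list[str] = []
--     for char in pattern:
--         if char == "*":
--             buffer.append("%")
--         elif char == "?":
--             buffer.append("_")
--         elif char == "\\":
--             buffer.append("\\\\")
--         elif char in {"%", "_"}:
--             buffer.append(f"\\{char}")
--         else:
--             buffer.append(char)
--     return "".join(buffer)
-- ===== SOURCE B (Python) =====
-- def _glob_to_like(pattern: str) -> str: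
--     """Convert a shell-style glob to a SQL LIKE pattern."""
--     s = pattern.replace("\\", "\\\\")
--     s = s.replace("%", "\\%")
--     s = s.replace("_", "\\_")
--     s = s.replace("*", "%")
--     return s.replace("?", "_")
-- ===== Notes on version B (the rewrite author's own statement) =====
-- stated objective: idiomatic
-- what changed: Replaced the per-character branch-and-append loop with a chain of five whole-string str.replace passes, ordered so backslashes and literal %/_ are escaped before * and ? introduce new wildcards.
import Mathlib
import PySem

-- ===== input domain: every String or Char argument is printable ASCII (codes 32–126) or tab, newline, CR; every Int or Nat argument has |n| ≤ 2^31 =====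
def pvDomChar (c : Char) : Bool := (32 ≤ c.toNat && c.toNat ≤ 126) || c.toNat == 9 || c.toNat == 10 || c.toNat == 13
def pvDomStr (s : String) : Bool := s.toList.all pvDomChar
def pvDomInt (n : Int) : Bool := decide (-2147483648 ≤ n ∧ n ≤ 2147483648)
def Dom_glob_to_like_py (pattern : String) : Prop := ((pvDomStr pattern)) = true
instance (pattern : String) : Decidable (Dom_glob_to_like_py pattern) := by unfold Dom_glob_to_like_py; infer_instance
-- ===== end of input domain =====

-- B replaces A's per-character loop with five whole-string replace passes (idiomatic; return value only, no side effects involved).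

-- ===== PORT A =====
-- the body of A's loop: what gets appended to `buffer` for one character
def globCharA (c : Char) : List Char :=
  if c == '*' then ['%']
  else if c == '?' then ['_']
  else if c == '\\' then ['\\', '\\']
  else if c == '%' || c == '_' then ['\\', c]
  else [c]

def glob_to_like_py (pattern : String) : String :=
  String.ofList (pattern.toList.foldl (fun buffer c => buffer ++ globCharA c) [])

-- ===== PORT B =====
def glob_to_like_py_alt (pattern : String) : String :=
  let s1 := PySem.Str.replace pattern "\\" "\\\\"
  let s2 := PySem.Str.replace s1 "%" "\\%"
  let s3 := PySem.Str.replace s2 "_" "\\_"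
  let s4 := PySem.Str.replace s3 "*" "%"
  PySem.Str.replace s4 "?" "_"

-- ===== PRECONDITION & SPEC =====
def Spec_glob_to_like_py (pattern : String) (out : String) : Prop := out = glob_to_like_py_alt pattern
instance (pattern : String) (out : String) : Decidable (Spec_glob_to_like_py pattern out) := by unfold Spec_glob_to_like_py; infer_instance

-- ===== CLAIM (what is proved, stated in full; the proofs are below) =====
def Claim_equal_glob_to_like_py : Prop := ∀ (pattern : String), Dom_glob_to_like_py pattern → Spec_glob_to_like_py pattern (glob_to_like_py pattern)

-- ===== LEMMAS AND PROOFS =====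

-- single-character replacement as a per-character flatMap
def subst1 (c : Char) (new : List Char) (l : List Char) : List Char :=
  l.flatMap (fun x => if x = c then new else [x])

lemma go_single (c : Char) (new : List Char) :
    ∀ (fuel : Nat) (l acc : List Char), l.length ≤ fuel →
      PySem.Chars.replace.go [c] new fuel l acc = acc.reverse ++ subst1 c new l := by
  intro fuel
  induction fuel with
  | zero =>
      intro l acc h
      have hl : l = [] := List.eq_nil_of_length_eq_zero (Nat.le_zero.mp h)
      subst hl
      simp [PySem.Chars.replace.go, subst1]
  | succ n ih =>
      intro l acc h
      cases l with
      | nil => simp [PySem.Chars.replace.go, subst1]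
      | cons x t =>
          rw [PySem.Chars.replace.go]
          by_cases hx : x = c
          · subst hx
            have hpre : List.isPrefixOf [x] (x :: t) = true := by
              simp [List.isPrefixOf]
            simp only [hpre, if_pos]
            rw [ih _ _ (by simpa using Nat.le_of_succ_le_succ h)]
            simp [subst1]
          · have hpre : List.isPrefixOf [c] (x :: t) = false := by
              simp [List.isPrefixOf]
              exact fun hcx => (hx hcx.symm).elim
            simp only [hpre]
            rw [if_neg (by simp), ih _ _ (by simpa using Nat.le_of_succ_le_succ h)]
            simp [subst1, hx]

lemma replace_single (c : Char) (new l : List Char) :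
    PySem.Chars.replace l [c] new = subst1 c new l := by
  rw [PySem.Chars.replace, if_neg (by simp)]
  exact go_single c new l.length l [] (le_refl _)

lemma subst1_append (c : Char) (new l1 l2 : List Char) :
    subst1 c new (l1 ++ l2) = subst1 c new l1 ++ subst1 c new l2 := by
  simp [subst1]

-- the five chained per-character substitutions, on lists
def chainB (l : List Char) : List Char :=
  subst1 '?' ['_'] (subst1 '*' ['%'] (subst1 '_' ['\\', '_']
    (subst1 '%' ['\\', '%'] (subst1 '\\' ['\\', '\\'] l))))

lemma chainB_append (l1 l2 : List Char) :
    chainB (l1 ++ l2) = chainB l1 ++ chainB l2 := by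
  simp [chainB, subst1_append]

lemma chainB_single (x : Char) : chainB [x] = globCharA x := by
  by_cases h1 : x = '*'
  · subst h1; decide
  by_cases h2 : x = '?'
  · subst h2; decide
  by_cases h3 : x = '\\'
  · subst h3; decide
  by_cases h4 : x = '%'
  · subst h4; decide
  by_cases h5 : x = '_'
  · subst h5; decide
  simp [chainB, subst1, globCharA, h1, h2, h3, h4, h5]

lemma chainB_eq_flatMap (l : List Char) : chainB l = l.flatMap globCharA := by
  induction l with
  | nil => decide
  | cons x t ih =>
      have : (x :: t) = [x] ++ t := rfl
      rw [this, chainB_append, chainB_single, ih]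
      simp

lemma alt_toList (pattern : String) :
    (glob_to_like_py_alt pattern).toList = chainB pattern.toList := by
  simp [glob_to_like_py_alt, PySem.Str.replace, chainB]
  rw [replace_single, replace_single, replace_single, replace_single, replace_single]

-- ===== VERDICT (by name: the statement is the Claim_ definition above) =====
theorem glob_to_like_py_spec : Claim_equal_glob_to_like_py := by
  intro pattern _
  unfold Spec_glob_to_like_py
  apply String.toList_injective
  rw [alt_toList]
  rw [chainB_eq_flatMap]
  simp [glob_to_like_py, List.flatMap_def]
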